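-- pv_equiv track=rewrite | github.com/rchopinw/coding_exercise | quora.py | largest_square_in_histogram
-- ===== SOURCE A (Python) =====
-- def largest_square_in_histogram(heights):
--     optimal = 0
--     for i in range(len(heights)):
--         step = 0
--         min_height = heights[i]
--         while i + step < len(heights) and min_height >= step + 1:
--             step += 1
--             if i + step >= len(heights):
--                 break
--             min_height = min(min_height, heights[i + step])
--         optimal = max(optimal, step ** 2)
--     return optimal
-- ===== SOURCE B (Python) =====
-- def largest_square_in_histogram(heights):
--     # Binary search on the square side s; side s fits iff some s consecutive
--     # bars are all >= s (checked by a single run-length scan). The side can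
--     # exceed neither the number of bars nor the tallest bar.
--     n = len(heights)
--
--     def feasible(s):
--         run = 0
--         for h in heights:
--             run = run + 1 if h >= s else 0
--             if run >= s:
--                 return True
--         return False
--
--     lo = 0
--     hi = min(n, max(heights)) if heights else 0
--     while lo < hi:
--         mid = (lo + hi + 1) // 2
--         if feasible(mid):
--             lo = mid
--         else:
--             hi = mid - 1
--     return lo * lo
-- ===== Notes on version B (the rewrite author's own statement) =====
-- stated objective: faster
-- what changed: Replaces A's per-index growing-window loop (re-scanning the histogram from every start) with a binary search on the square side whose feasibility test is a single linear run-length scan for a run of s consecutive bars all >= s.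
import Mathlib
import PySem

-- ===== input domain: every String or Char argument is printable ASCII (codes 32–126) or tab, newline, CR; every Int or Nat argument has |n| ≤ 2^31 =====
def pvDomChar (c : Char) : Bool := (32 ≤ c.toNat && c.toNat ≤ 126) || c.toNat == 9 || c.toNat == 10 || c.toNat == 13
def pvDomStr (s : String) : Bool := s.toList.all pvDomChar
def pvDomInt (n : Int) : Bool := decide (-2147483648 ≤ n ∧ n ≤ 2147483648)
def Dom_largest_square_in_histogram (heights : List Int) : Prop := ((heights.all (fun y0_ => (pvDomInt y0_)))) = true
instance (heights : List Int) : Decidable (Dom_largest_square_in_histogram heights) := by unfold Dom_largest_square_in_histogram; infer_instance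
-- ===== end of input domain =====

-- B changes the algorithm: binary search on the square side with a linear run-length
-- feasibility scan (O(n log n)) instead of A's per-index growing-window loop; measured faster.

-- ===== PORT A =====
-- inner while-loop of A; the guard keeps i+step in range, so getD 0 is never the default
-- fuel ≥ heights.length - (i + step) bounds the iterations, so the 0-fuel branch is never hit
def pvAInner (heights : List Int) (i : Nat) : Nat → Nat → Int → Nat
  | 0, step, _ => step
  | fuel + 1, step, minh =>
    if i + step < heights.length ∧ (step : Int) + 1 ≤ minh then
      if heights.length ≤ i + (step + 1) then step + 1
      else pvAInner heights i fuel (step + 1) (min minh (heights.getD (i + (step + 1)) 0))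
    else step

def largest_square_in_histogram (heights : List Int) : Int :=
  (List.range heights.length).foldl
    (fun optimal i =>
      max optimal ((pvAInner heights i heights.length 0 (heights.getD i 0) : Int) ^ 2)) 0

-- ===== PORT B =====
-- the `for h in heights` scan of feasible(s), with early return on run >= s
def pvFeasGo (s : Int) : List Int → Int → Bool
  | [], _ => false
  | hd :: t, run =>
    let run' := if s ≤ hd then run + 1 else 0
    if s ≤ run' then true else pvFeasGo s t run'

def pvFeasible (heights : List Int) (s : Int) : Bool := pvFeasGo s heights 0

-- fuel ≥ (hi - lo).toNat bounds the halvings, so the 0-fuel branch is never hit with lo < hi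
def pvBsearch (heights : List Int) : Nat → Int → Int → Int
  | 0, lo, _ => lo
  | fuel + 1, lo, hi =>
    if lo < hi then
      let mid := PySem.Int.floordiv (lo + hi + 1) 2
      if pvFeasible heights mid then pvBsearch heights fuel mid hi
      else pvBsearch heights fuel lo (mid - 1)
    else lo

-- hi = min(n, max(heights)) if heights else 0
def largest_square_in_histogram_alt (heights : List Int) : Int :=
  let hi0 : Int := match heights with
    | [] => 0
    | x :: t => min (heights.length : Int) (t.foldl max x)
  let L := pvBsearch heights heights.length 0 hi0
  L * L

-- ===== PRECONDITION & SPEC =====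
def Spec_largest_square_in_histogram (heights : List Int) (out : Int) : Prop := out = largest_square_in_histogram_alt heights
instance (heights : List Int) (out : Int) : Decidable (Spec_largest_square_in_histogram heights out) := by unfold Spec_largest_square_in_histogram; infer_instance

-- ===== CLAIM (what is proved, stated in full; the proofs are below) =====
def Claim_equal_largest_square_in_histogram : Prop := ∀ (heights : List Int), Dom_largest_square_in_histogram heights → Spec_largest_square_in_histogram heights (largest_square_in_histogram heights)

-- ===== LEMMAS AND PROOFS =====

-- a window of length s starting at i whose bars are all ≥ s
def pvOk (h : List Int) (i s : Nat) : Prop := ∀ j < s, (s : Int) ≤ h.getD (i + j) 0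

-- side s is achievable somewhere
def pvFeasN (h : List Int) (s : Nat) : Prop := ∃ i, i + s ≤ h.length ∧ pvOk h i s

-- what pvFeasGo's scan detects: a qualifying run, possibly using `r` bars of credit at the front
def pvE (s : Int) (l : List Int) (r : Int) : Prop :=
  ∃ m k : Nat, m + k ≤ l.length ∧ s ≤ (if m = 0 then r else 0) + (k : Int) ∧
    ∀ j < k, s ≤ l.getD (m + j) 0

-- the best side, as A's per-start maxima folded together
def pvBest (h : List Int) : Nat :=
  (List.range h.length).foldl (fun m i => max m (pvAInner h i h.length 0 (h.getD i 0))) 0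

lemma pvOk_mono (h : List Int) (i s t : Nat) (hst : s ≤ t) (ht : pvOk h i t) : pvOk h i s := by
  intro j hj
  have h1 : (t : Int) ≤ h.getD (i + j) 0 := ht j (by omega)
  have hcast : (s : Int) ≤ (t : Int) := by exact_mod_cast hst
  omega

lemma pvFeasN_mono (h : List Int) (s t : Nat) (hst : s ≤ t) (ht : pvFeasN h t) : pvFeasN h s := by
  obtain ⟨i, hi, hok⟩ := ht
  exact ⟨i, by omega, pvOk_mono h i s t hst hok⟩

lemma innerA_props_aux (h : List Int) (i : Nat) :
    ∀ fuel step minh, h.length - (i + step) ≤ fuel → i + step < h.length →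
    (∀ j ≤ step, minh ≤ h.getD (i + j) 0) →
    (∃ j ≤ step, h.getD (i + j) 0 ≤ minh) →
    (∀ j < step, (step : Int) ≤ h.getD (i + j) 0) →
    step ≤ pvAInner h i fuel step minh ∧
    i + pvAInner h i fuel step minh ≤ h.length ∧
    (∀ j < pvAInner h i fuel step minh, (pvAInner h i fuel step minh : Int) ≤ h.getD (i + j) 0) ∧
    (i + pvAInner h i fuel step minh = h.length ∨
      ∃ j ≤ pvAInner h i fuel step minh, h.getD (i + j) 0 < (pvAInner h i fuel step minh : Int) + 1) := by
  intro fuel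
  induction fuel with
  | zero => intro step minh hf hin _ _ _; omega
  | succ f ih =>
    intro step minh hf hin inv1 inv2 hok
    simp only [pvAInner]
    by_cases hc : i + step < h.length ∧ (step : Int) + 1 ≤ minh
    · by_cases hend : h.length ≤ i + (step + 1)
      · simp only [if_pos hc, if_pos hend]
        refine ⟨by omega, by omega, ?_, Or.inl (by omega)⟩
        intro j hj
        have h1 : minh ≤ h.getD (i + j) 0 := inv1 j (by omega)
        have h2 : (step : Int) + 1 ≤ minh := hc.2
        have h3 : ((step + 1 : Nat) : Int) = (step : Int) + 1 := by push_cast; ring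
        omega
      · simp only [if_pos hc, if_neg hend]
        have hin' : i + (step + 1) < h.length := by omega
        have hrec := ih (step + 1) (min minh (h.getD (i + (step + 1)) 0)) (by omega) hin'
          (by
            intro j hj
            rcases Nat.lt_or_ge j (step + 1) with hj' | hj'
            · exact le_trans (min_le_left _ _) (inv1 j (by omega))
            · have : j = step + 1 := by omega
              subst this
              exact min_le_right _ _)
          (by
            rcases le_total minh (h.getD (i + (step + 1)) 0) with hmm | hmm
            · obtain ⟨j0, hj0, hj0'⟩ := inv2
              exact ⟨j0, by omega, by rw [min_eq_left hmm]; exact hj0'⟩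
            · exact ⟨step + 1, le_refl _, by rw [min_eq_right hmm]⟩)
          (by
            intro j hj
            have h1 : minh ≤ h.getD (i + j) 0 := inv1 j (by omega)
            have h2 : (step : Int) + 1 ≤ minh := hc.2
            have h3 : ((step + 1 : Nat) : Int) = (step : Int) + 1 := by push_cast; ring
            omega)
        exact ⟨by omega, hrec.2.1, hrec.2.2.1, hrec.2.2.2⟩
    · simp only [if_neg hc]
      have hminh : minh < (step : Int) + 1 := by
        by_contra hcon
        exact hc ⟨hin, by omega⟩
      obtain ⟨j0, hj0, hj0'⟩ := inv2
      exact ⟨le_refl _, by omega, hok, Or.inr ⟨j0, hj0, by omega⟩⟩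

lemma innerA_props (h : List Int) (i : Nat) (hi : i < h.length) :
    i + pvAInner h i h.length 0 (h.getD i 0) ≤ h.length ∧
    (∀ j < pvAInner h i h.length 0 (h.getD i 0), (pvAInner h i h.length 0 (h.getD i 0) : Int) ≤ h.getD (i + j) 0) ∧
    (i + pvAInner h i h.length 0 (h.getD i 0) = h.length ∨
      ∃ j ≤ pvAInner h i h.length 0 (h.getD i 0), h.getD (i + j) 0 < (pvAInner h i h.length 0 (h.getD i 0) : Int) + 1) := by
  have := innerA_props_aux h i h.length 0 (h.getD i 0) (by omega) (by omega)
    (by intro j hj; interval_cases j; simp)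
    ⟨0, le_refl _, by simp⟩
    (by intro j hj; omega)
  exact ⟨this.2.1, this.2.2.1, this.2.2.2⟩

lemma E_cons_ge (s hd run : Int) (t : List Int) (hhd : s ≤ hd) (hrun : 0 ≤ run)
    (hrs : run + 1 < s) : pvE s t (run + 1) ↔ pvE s (hd :: t) run := by
  constructor
  · rintro ⟨m, k, h1, h2, h3⟩
    rcases m with _ | m'
    · refine ⟨0, k + 1, by simp; omega, by simp at h2 ⊢; push_cast; push_cast at h2; omega, ?_⟩
      intro j hj
      rcases j with _ | j'
      · simpa using hhd
      · have := h3 j' (by omega)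
        simpa using this
    · refine ⟨m' + 2, k, by simp at h1 ⊢; omega, by simp at h2 ⊢; omega, ?_⟩
      intro j hj
      have := h3 j hj
      simp only [List.getD] at this ⊢
      have heq : m' + 2 + j = (m' + 1 + j) + 1 := by omega
      rw [heq]
      simpa using this
  · rintro ⟨m, k, h1, h2, h3⟩
    rcases m with _ | m'
    · rcases k with _ | k'
      · simp at h2; omega
      · refine ⟨0, k', by simp at h1 ⊢; omega, by simp at h2 ⊢; push_cast at h2 ⊢; omega, ?_⟩
        intro j hj
        have := h3 (j + 1) (by omega)
        simpa using this
    · refine ⟨m', k, by simp at h1 ⊢; omega, ?_, ?_⟩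
      · simp at h2
        rcases Nat.eq_zero_or_pos m' with hm | hm
        · subst hm; simp; omega
        · simp [Nat.pos_iff_ne_zero.mp hm] at h2 ⊢; omega
      · intro j hj
        have := h3 j hj
        have heq : m' + 1 + j = (m' + j) + 1 := by omega
        rw [heq] at this
        simpa using this

lemma E_cons_lt (s hd run : Int) (t : List Int) (hhd : hd < s) (hrun : 0 ≤ run)
    (hrs : run < s) : pvE s t 0 ↔ pvE s (hd :: t) run := by
  constructor
  · rintro ⟨m, k, h1, h2, h3⟩
    refine ⟨m + 1, k, by simp at h1 ⊢; omega, ?_, ?_⟩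
    · simp at h2 ⊢
      omega
    · intro j hj
      have := h3 j hj
      have heq : m + 1 + j = (m + j) + 1 := by omega
      rw [heq]
      simpa using this
  · rintro ⟨m, k, h1, h2, h3⟩
    rcases m with _ | m'
    · rcases k with _ | k'
      · simp at h2; omega
      · exfalso
        have := h3 0 (by omega)
        simp at this
        omega
    · refine ⟨m', k, by simp at h1 ⊢; omega, ?_, ?_⟩
      · simp at h2
        rcases Nat.eq_zero_or_pos m' with hm | hm
        · subst hm; simp at h2 ⊢; omega
        · simp [Nat.pos_iff_ne_zero.mp hm] at h2 ⊢; omega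
      · intro j hj
        have := h3 j hj
        have heq : m' + 1 + j = (m' + j) + 1 := by omega
        rw [heq] at this
        simpa using this

lemma feasGo_iff (s : Int) : ∀ (l : List Int) (run : Int), 0 ≤ run → run < s →
    (pvFeasGo s l run = true ↔ pvE s l run) := by
  intro l
  induction l with
  | nil =>
    intro run h0 hrs
    simp only [pvFeasGo, pvE]
    constructor
    · intro hfalse; exact absurd hfalse (by simp)
    · rintro ⟨m, k, h1, h2, h3⟩
      simp at h1
      obtain ⟨hm, hk⟩ := h1
      subst hm; subst hk
      simp at h2
      omega
  | cons hd t ih =>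
    intro run h0 hrs
    rw [pvFeasGo]
    by_cases hhd : s ≤ hd
    · simp only [if_pos hhd]
      by_cases hstop : s ≤ run + 1
      · simp only [if_pos hstop]
        constructor
        · intro _
          exact ⟨0, 1, by simp, by simp; omega, by intro j hj; interval_cases j; simpa⟩
        · intro _; trivial
      · simp only [if_neg hstop]
        rw [ih (run + 1) (by omega) (by omega)]
        exact E_cons_ge s hd run t hhd h0 (by omega)
    · simp only [if_neg hhd]
      have hs0 : ¬ (s ≤ (0 : Int)) := by omega
      simp only [if_neg hs0]
      rw [ih 0 (by omega) (by omega)]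
      exact E_cons_lt s hd run t (by omega) h0 hrs

lemma feasible_iff (h : List Int) (t : Nat) (ht : 1 ≤ t) :
    (pvFeasible h (t : Int) = true ↔ pvFeasN h t) := by
  unfold pvFeasible
  rw [feasGo_iff (t : Int) h 0 (le_refl _) (by exact_mod_cast ht)]
  constructor
  · rintro ⟨m, k, h1, h2, h3⟩
    have hk : t ≤ k := by
      rcases Nat.eq_zero_or_pos m with hm | hm
      · subst hm; simp at h2; exact_mod_cast h2
      · simp [Nat.pos_iff_ne_zero.mp hm] at h2; exact_mod_cast h2
    exact ⟨m, by omega, fun j hj => h3 j (by omega)⟩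
  · rintro ⟨i, hi, hok⟩
    exact ⟨i, t, by omega, by simp, fun j hj => hok j hj⟩

lemma le_foldl_max (f : Nat → Nat) : ∀ (l : List Nat) (a : Nat),
    a ≤ l.foldl (fun m i => max m (f i)) a := by
  intro l
  induction l with
  | nil => intro a; simp
  | cons x xs ih =>
    intro a
    simp only [List.foldl_cons]
    exact le_trans (le_max_left a (f x)) (ih (max a (f x)))

lemma foldl_max_le_of_mem (f : Nat → Nat) : ∀ (l : List Nat) (a x : Nat), x ∈ l →
    f x ≤ l.foldl (fun m i => max m (f i)) a := by
  intro l
  induction l with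
  | nil => intro a x hx; simp at hx
  | cons y ys ih =>
    intro a x hx
    simp only [List.foldl_cons]
    rcases List.mem_cons.mp hx with hx | hx
    · subst hx
      exact le_trans (le_max_right a (f x)) (le_foldl_max f ys _)
    · exact ih _ x hx

lemma foldl_max_cases (f : Nat → Nat) : ∀ (l : List Nat) (a : Nat),
    l.foldl (fun m i => max m (f i)) a = a ∨
      ∃ x ∈ l, l.foldl (fun m i => max m (f i)) a = f x := by
  intro l
  induction l with
  | nil => intro a; left; simp
  | cons y ys ih =>
    intro a
    simp only [List.foldl_cons]
    rcases ih (max a (f y)) with hcase | ⟨x, hx, hcase⟩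
    · rw [hcase]
      rcases le_total a (f y) with hle | hle
      · exact Or.inr ⟨y, List.mem_cons_self, max_eq_right hle⟩
      · exact Or.inl (max_eq_left hle)
    · exact Or.inr ⟨x, List.mem_cons_of_mem _ hx, hcase⟩

lemma best_ge (h : List Int) (t : Nat) (ht : pvFeasN h t) : t ≤ pvBest h := by
  rcases Nat.eq_zero_or_pos t with ht0 | ht0
  · omega
  obtain ⟨i, hi, hok⟩ := ht
  have hilt : i < h.length := by omega
  obtain ⟨hlen, hwin, hstop⟩ := innerA_props h i hilt
  set r := pvAInner h i h.length 0 (h.getD i 0) with hr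
  have htr : t ≤ r := by
    by_contra hcon
    push_neg at hcon
    rcases hstop with hend | ⟨j, hj, hjlt⟩
    · omega
    · have h1 : (t : Int) ≤ h.getD (i + j) 0 := hok j (by omega)
      have h2 : (r : Int) + 1 ≤ (t : Int) := by exact_mod_cast hcon
      omega
  have : r ≤ pvBest h := by
    unfold pvBest
    exact foldl_max_le_of_mem (fun j => pvAInner h j h.length 0 (h.getD j 0)) (List.range h.length) 0 i (List.mem_range.mpr hilt)
  omega

lemma best_feas (h : List Int) : pvBest h = 0 ∨ pvFeasN h (pvBest h) := by
  rcases foldl_max_cases (fun i => pvAInner h i h.length 0 (h.getD i 0)) (List.range h.length) 0 with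
    hcase | ⟨i, hi, hcase⟩
  · left; exact hcase
  · right
    have hilt : i < h.length := List.mem_range.mp hi
    obtain ⟨hlen, hwin, _⟩ := innerA_props h i hilt
    unfold pvBest
    rw [hcase]
    exact ⟨i, hlen, hwin⟩

lemma best_le_len (h : List Int) : pvBest h ≤ h.length := by
  rcases best_feas h with h0 | ⟨i, hi, _⟩ <;> omega

lemma bsearch_eq_aux (h : List Int) : ∀ (fuel : Nat) (lo hi : Int), (hi - lo).toNat ≤ fuel →
    0 ≤ lo → lo ≤ (pvBest h : Int) → (pvBest h : Int) ≤ hi → hi ≤ (h.length : Int) →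
    pvBsearch h fuel lo hi = (pvBest h : Int) := by
  intro fuel
  induction fuel with
  | zero =>
    intro lo hi hf h0 h1 h2 h3
    simp only [pvBsearch]
    omega
  | succ f ih =>
    intro lo hi hf h0 h1 h2 h3
    simp only [pvBsearch]
    by_cases hlt : lo < hi
    · simp only [if_pos hlt]
      have hmid : PySem.Int.floordiv (lo + hi + 1) 2 = (lo + hi + 1) / 2 :=
        PySem.Int.floordiv_eq_ediv_of_pos (by omega)
      rw [hmid]
      set mid := (lo + hi + 1) / 2 with hmiddef
      have hmlo : lo + 1 ≤ mid := by omega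
      have hmhi : mid ≤ hi := by omega
      by_cases hfeas : pvFeasible h mid = true
      · simp only [if_pos hfeas]
        have hmle : mid ≤ (pvBest h : Int) := by
          have hm1 : 1 ≤ mid := by omega
          have hmidnat : ((mid.toNat : Nat) : Int) = mid := Int.toNat_of_nonneg (by omega)
          have hfeas' : pvFeasible h ((mid.toNat : Nat) : Int) = true := by rw [hmidnat]; exact hfeas
          have := (feasible_iff h mid.toNat (by omega)).mp hfeas'
          have := best_ge h mid.toNat this
          omega
        exact ih mid hi (by omega) (by omega) hmle h2 h3
      · simp only [if_neg hfeas]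
        have hmgt : (pvBest h : Int) ≤ mid - 1 := by
          by_contra hcon
          push_neg at hcon
          have hmle : mid ≤ (pvBest h : Int) := by omega
          have hm1 : 1 ≤ mid := by omega
          have hfn : pvFeasN h mid.toNat := by
            rcases best_feas h with hb0 | hbf
            · omega
            · exact pvFeasN_mono h mid.toNat (pvBest h) (by omega) hbf
          have := (feasible_iff h mid.toNat (by omega)).mpr hfn
          rw [Int.toNat_of_nonneg (by omega)] at this
          exact hfeas this
        exact ih lo (mid - 1) (by omega) h0 h1 hmgt (by omega)
    · simp only [if_neg hlt]
      omega

lemma sq_max (a b : Nat) : ((max a b : Nat) : Int) ^ 2 = max ((a : Int) ^ 2) ((b : Int) ^ 2) := by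
  rcases le_total a b with hab | hab
  · rw [max_eq_right hab, max_eq_right]
    have : (a : Int) ≤ (b : Int) := by exact_mod_cast hab
    exact pow_le_pow_left₀ (by positivity) this 2
  · rw [max_eq_left hab, max_eq_left]
    have : (b : Int) ≤ (a : Int) := by exact_mod_cast hab
    exact pow_le_pow_left₀ (by positivity) this 2

lemma foldl_sq (h : List Int) : ∀ (l : List Nat) (acc : Nat),
    l.foldl (fun optimal i => max optimal ((pvAInner h i h.length 0 (h.getD i 0) : Int) ^ 2))
      ((acc : Int) ^ 2) =
    ((l.foldl (fun m i => max m (pvAInner h i h.length 0 (h.getD i 0))) acc : Nat) : Int) ^ 2 := by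
  intro l
  induction l with
  | nil => intro acc; simp
  | cons x xs ih =>
    intro acc
    simp only [List.foldl_cons]
    rw [← sq_max, ih]

lemma A_eq_best (h : List Int) : largest_square_in_histogram h = ((pvBest h : Int)) ^ 2 := by
  unfold largest_square_in_histogram pvBest
  have hfs := foldl_sq h (List.range h.length) 0
  norm_num at hfs
  exact hfs

lemma bsearch_stuck (h : List Int) : ∀ (fuel : Nat) (lo hi : Int), ¬ lo < hi →
    pvBsearch h fuel lo hi = lo := by
  intro fuel lo hi hnl
  cases fuel with
  | zero => simp [pvBsearch]
  | succ f => simp [pvBsearch, if_neg hnl]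

lemma mem_le_foldl_max : ∀ (t : List Int) (x e : Int), e ∈ x :: t → e ≤ t.foldl max x := by
  intro t
  induction t with
  | nil => intro x e he; simp at he; simp [he]
  | cons y t ih =>
    intro x e he
    simp only [List.foldl_cons]
    have hhead : max x y ≤ t.foldl max (max x y) :=
      ih (max x y) (max x y) List.mem_cons_self
    rcases List.mem_cons.mp he with rfl | he
    · exact le_trans (le_max_left e y) hhead
    · rcases List.mem_cons.mp he with rfl | he
      · exact le_trans (le_max_right x e) hhead
      · exact ih (max x y) e (List.mem_cons.mpr (Or.inr he))

lemma alt_eq (h : List Int) :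
    largest_square_in_histogram_alt h = ((pvBest h : Int)) * ((pvBest h : Int)) := by
  cases h with
  | nil =>
    have hb : pvBest ([] : List Int) = 0 := by simp [pvBest]
    show pvBsearch [] 0 0 0 * pvBsearch [] 0 0 0 = _
    simp [pvBsearch, hb]
  | cons x t =>
    show pvBsearch (x :: t) (x :: t).length 0 (min ((x :: t).length : Int) (t.foldl max x)) *
         pvBsearch (x :: t) (x :: t).length 0 (min ((x :: t).length : Int) (t.foldl max x)) =
         ((pvBest (x :: t) : Int)) * ((pvBest (x :: t) : Int))
    set h : List Int := x :: t with hh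
    set hi0 : Int := min ((x :: t).length : Int) (t.foldl max x) with hhi0
    have hB : pvBsearch h h.length 0 hi0 = (pvBest h : Int) := by
      rcases Nat.eq_zero_or_pos (pvBest h) with hb0 | hb1
      · by_cases hpos : 0 < hi0
        · exact bsearch_eq_aux h h.length 0 hi0 (by simp [hh] at hhi0 ⊢; omega) le_rfl
            (by simp [hb0]) (by simp [hb0]; omega) (by simp [hh] at hhi0 ⊢; omega)
        · rw [bsearch_stuck h h.length 0 hi0 hpos, hb0]
          norm_num
      · have hble : (pvBest h : Int) ≤ hi0 := by
          have hlen : pvBest h ≤ h.length := best_le_len h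
          rcases best_feas h with hc | ⟨i, hi, hok⟩
          · omega
          · have hilt : i < h.length := by omega
            have hmem : h.getD i 0 ∈ h := by
              have : h.getD i 0 = h[i] := List.getD_eq_getElem h 0 hilt
              rw [this]
              exact List.getElem_mem hilt
            have h1 : (pvBest h : Int) ≤ h.getD (i + 0) 0 := hok 0 (by omega)
            have h2 : h.getD i 0 ≤ t.foldl max x := mem_le_foldl_max t x _ hmem
            simp only [Nat.add_zero] at h1
            have h3 : (pvBest h : Int) ≤ (h.length : Int) := by exact_mod_cast hlen
            have h4 : hi0 = min ((h.length : Nat) : Int) (t.foldl max x) := by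
              rw [hhi0, hh]
            omega
        exact bsearch_eq_aux h h.length 0 hi0 (by simp [hh] at hhi0 ⊢; omega) le_rfl
          (by positivity) hble (by simp [hh] at hhi0 ⊢; omega)
    rw [hB]

theorem largest_square_in_histogram_spec : Claim_equal_largest_square_in_histogram := by
  intro h _
  unfold Spec_largest_square_in_histogram
  rw [A_eq_best, alt_eq h]
  ring
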